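-- pv_equiv track=rewrite | github.com/lccol/bridge-clustering | read_configurations.py | _dict_union
-- ===== SOURCE A (Python) =====
-- def _dict_union(a: dict, b: dict):
--     res = {}
--     for k in a:
--         assert not k in res
--         res[k] = a[k]
--
--     for k in b:
--         assert not k in res
--         res[k] = b[k]
--     return res
-- ===== SOURCE B (Python) =====
-- def _dict_union(a: dict, b: dict):
--     def go(res, items):
--         if not items:
--             return res
--         (k, v), rest = items[0], items[1:]
--         assert k not in a
--         res[k] = v
--         return go(res, rest)
--     return go(dict(a), list(b.items()))
-- ===== Notes on version B (the rewrite author's own statement) =====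
-- stated objective: alternative
-- what changed: Replaces A's two interleaved check-and-insert loops by a tail-recursive single pass over b's items with an accumulator seeded from a wholesale copy of a; each b-key is validated by membership in the original a rather than in the growing result, and a itself is never looped over.
-- outside the precondition, e.g. on _dict_union({'x': '1'}, {'x': '2'}): A raises AssertionError, B raises AssertionError
import Mathlib
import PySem

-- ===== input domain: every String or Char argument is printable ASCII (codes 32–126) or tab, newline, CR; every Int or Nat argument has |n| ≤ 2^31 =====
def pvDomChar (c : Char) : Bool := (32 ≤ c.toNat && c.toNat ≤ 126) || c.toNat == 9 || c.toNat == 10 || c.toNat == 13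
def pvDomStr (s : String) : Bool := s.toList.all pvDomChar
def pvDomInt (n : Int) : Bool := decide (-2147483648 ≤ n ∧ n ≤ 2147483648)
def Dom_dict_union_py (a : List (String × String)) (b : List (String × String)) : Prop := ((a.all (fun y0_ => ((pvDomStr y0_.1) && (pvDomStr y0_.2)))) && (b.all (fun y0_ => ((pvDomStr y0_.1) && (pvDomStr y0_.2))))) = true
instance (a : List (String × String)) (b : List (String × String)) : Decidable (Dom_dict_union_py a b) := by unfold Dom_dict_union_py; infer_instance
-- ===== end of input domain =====

-- B replaces A's two interleaved check-and-insert loops by a tail-recursive single pass over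
-- b's items (accumulator seeded from a copy of a, keys validated against the original a);
-- equivalence is proved on disjoint-key dict inputs (alternative decomposition).

-- ===== PORT A =====
-- A: res = {}; for k in a: assert k not in res; res[k] = a[k]; same for b; return res.
-- a[k] is ported as getD with a dummy default: exact here because k is drawn from a's keys,
-- so the KeyError branch is unreachable. The asserts only raise; the inputs on which they
-- fire (overlapping keys) are excluded by Pre_ below.
def dict_union_py (a : List (String × String)) (b : List (String × String)) : List (String × String) :=
  let da := PySem.Dict.mk a
  let db := PySem.Dict.mk b
  let res : PySem.Dict String String := PySem.Dict.empty
  let res := da.keys.foldl (fun res k => res.insert k (da.getD k "")) res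
  let res := db.keys.foldl (fun res k => res.insert k (db.getD k "")) res
  res.items

-- ===== PORT B =====
-- B: go(res, items) = res if items empty, else (k,v) = items[0]; assert k not in a;
-- res[k] = v; recurse on items[1:].  The assert only raises (excluded by Pre_), so it
-- has no computational content; the recursion is transcribed as structural recursion.
def pvGoB (res : PySem.Dict String String) : List (String × String) → PySem.Dict String String
  | [] => res
  | (k, v) :: rest => pvGoB (res.insert k v) rest

def dict_union_py_alt (a : List (String × String)) (b : List (String × String)) : List (String × String) :=
  (pvGoB (PySem.Dict.mk a) (PySem.Dict.mk b).items).items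

-- ===== PRECONDITION & SPEC =====
-- Pre_ restricts to valid dict encodings (association lists with unique keys — a Python dict
-- argument always has those) whose key sets are disjoint; on overlapping keys both A and B
-- raise AssertionError, so those inputs are excluded.
def Pre_dict_union_py (a : List (String × String)) (b : List (String × String)) : Prop :=
  (a.map Prod.fst).Nodup ∧ (b.map Prod.fst).Nodup ∧
  ∀ k ∈ a.map Prod.fst, k ∉ b.map Prod.fst
instance (a : List (String × String)) (b : List (String × String)) : Decidable (Pre_dict_union_py a b) := by unfold Pre_dict_union_py; infer_instance

def pvWitness_dict_union_py : (List (String × String)) × (List (String × String)) :=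
  ([("x", "1"), ("y", "2")], [("z", "3")])

def Spec_dict_union_py (a : List (String × String)) (b : List (String × String)) (out : List (String × String)) : Prop := out = dict_union_py_alt a b
instance (a : List (String × String)) (b : List (String × String)) (out : List (String × String)) : Decidable (Spec_dict_union_py a b out) := by unfold Spec_dict_union_py; infer_instance

-- ===== CLAIM (what is proved, stated in full; the proofs are below) =====
def Claim_equal_dict_union_py : Prop := ∀ (a : List (String × String)) (b : List (String × String)), Dom_dict_union_py a b → Pre_dict_union_py a b → Spec_dict_union_py a b (dict_union_py a b)

-- ===== LEMMAS AND PROOFS =====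

-- A loop 'for k in d.keys: res[k] = d[k]' over a dict with Nodup keys, all fresh for res,
-- appends d.items to res.items.
theorem pv_copy_loop (d res : PySem.Dict String String)
    (hnd : d.keys.Nodup) (hfresh : ∀ k ∈ d.keys, res.contains k = false) :
    (d.keys.foldl (fun res k => res.insert k (d.getD k "")) res).items
      = res.items ++ d.items := by
  have h := PySem.Dict.items_foldl_insert_fresh (k := id) (v := fun k => d.getD k "")
        (l := d.keys) (d := res) (by simpa using hfresh) (by simpa using hnd)
  simp only [id_eq] at h
  rw [h, ← PySem.Dict.items_eq_map_keys d hnd ""]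

theorem pv_A_items (a b : List (String × String)) (h : Pre_dict_union_py a b) :
    dict_union_py a b = a ++ b := by
  obtain ⟨ha, hb, hdisj⟩ := h
  show ((PySem.Dict.mk b).keys.foldl _ ((PySem.Dict.mk a).keys.foldl _ PySem.Dict.empty)).items = a ++ b
  have hka : (PySem.Dict.mk a).keys = a.map Prod.fst := by simp [PySem.Dict.keys]
  have hkb : (PySem.Dict.mk b).keys = b.map Prod.fst := by simp [PySem.Dict.keys]
  have h1 : ((PySem.Dict.mk a).keys.foldl
      (fun res k => res.insert k ((PySem.Dict.mk a).getD k "")) PySem.Dict.empty).items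
      = a := by
    rw [pv_copy_loop _ _ (by rw [hka]; exact ha)
      (fun k _ => by simp [PySem.Dict.contains_empty])]
    simp [PySem.Dict.empty]
  have hfresh : ∀ k ∈ (PySem.Dict.mk b).keys,
      ((PySem.Dict.mk a).keys.foldl
        (fun res k => res.insert k ((PySem.Dict.mk a).getD k "")) PySem.Dict.empty).contains k = false := by
    intro k hk
    rw [hkb] at hk
    have hkeys : ((PySem.Dict.mk a).keys.foldl
        (fun res k => res.insert k ((PySem.Dict.mk a).getD k "")) PySem.Dict.empty).keys
        = PySem.Set.update PySem.Dict.empty.keys (PySem.Dict.mk a).keys :=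
      PySem.Dict.keys_foldl_insert _ _ _
    have hnotmem : k ∉ a.map Prod.fst := fun hmem => hdisj k hmem hk
    rw [PySem.Dict.contains_eq_decide_mem_keys, hkeys]
    simp only [PySem.Dict.keys_empty, PySem.Set.update_nil_left, hka]
    simp only [decide_eq_false_iff_not]
    intro hmem
    exact hnotmem (by
      have := PySem.Set.mem_ofList (xs := a.map Prod.fst) (y := k)
      exact this.mp hmem)
  rw [pv_copy_loop _ _ (by rw [hkb]; exact hb) hfresh, h1]

-- B's recursion is the fold of insert over the item list.
theorem pv_goB_eq_foldl (l : List (String × String)) (res : PySem.Dict String String) :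
    pvGoB res l = l.foldl (fun d p => d.insert p.1 p.2) res := by
  induction l generalizing res with
  | nil => rfl
  | cons p rest ih => cases p; simp [pvGoB, ih]

theorem pv_B_items (a b : List (String × String)) (h : Pre_dict_union_py a b) :
    dict_union_py_alt a b = a ++ b := by
  obtain ⟨_, hb, hdisj⟩ := h
  show (pvGoB (PySem.Dict.mk a) (PySem.Dict.mk b).items).items = a ++ b
  have hitems : (PySem.Dict.mk b).items = b := rfl
  rw [hitems, pv_goB_eq_foldl]
  rw [PySem.Dict.items_foldl_insert_fresh (k := Prod.fst) (v := Prod.snd)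
        (l := b) (d := PySem.Dict.mk a)
        (fun p hp => by
          rw [PySem.Dict.contains_eq_decide_mem_keys]
          simp only [PySem.Dict.keys_mk, decide_eq_false_iff_not]
          intro hmem
          exact hdisj p.1 hmem (List.mem_map_of_mem hp))
        hb]
  simp

-- ===== VERDICT (by name: the statement is the Claim_ definition above) =====
theorem dict_union_py_spec : Claim_equal_dict_union_py := by
  intro a b _ hpre
  show dict_union_py a b = dict_union_py_alt a b
  rw [pv_A_items a b hpre, pv_B_items a b hpre]
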